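-- pv_equiv track=rewrite | github.com/CYLIU2003/master-course | bff/services/gtfs_import.py | _service_id_from_calendar_dates
-- ===== SOURCE A (Python) =====
-- from typing import Any, DefaultDict, Dict, Iterable, List, Optional, Tuple, cast
--
-- def _append_warning(warnings: list[str], message: str, limit: int = 24) -> None:
--     if message in warnings:
--         return
--     if len(warnings) < limit:
--         warnings.append(message)
--     elif len(warnings) == limit:
--         warnings.append(f"Additional GTFS warnings omitted after {limit} entries.")
--
-- def _service_id_from_calendar_dates(
--     raw_service_id: str,
--     weekday_indexes: Iterable[int],
--     warnings: list[str],
-- ) -> str: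
--     weekdays = {int(index) for index in weekday_indexes}
--     if not weekdays:
--         return "WEEKDAY"
--     if weekdays.issubset({0, 1, 2, 3, 4}):
--         return "WEEKDAY"
--     if weekdays == {5}:
--         return "SAT"
--     if weekdays == {6}:
--         return "SUN_HOL"
--     if weekdays.issubset({5, 6}):
--         _append_warning(
--             warnings,
--             f"GTFS service_id '{raw_service_id}' appears on both Saturday and Sunday exception dates; mapped to SUN_HOL.",
--         )
--         return "SUN_HOL"
--
--     _append_warning(
--         warnings,
--         f"GTFS service_id '{raw_service_id}' only appears in calendar_dates.txt with mixed weekdays; mapped to WEEKDAY.",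
--     )
--     return "WEEKDAY"
-- ===== SOURCE B (Python) =====
-- def _append_warning(warnings, message, limit=24):
--     if message in warnings:
--         return
--     if len(warnings) < limit:
--         warnings.append(message)
--     elif len(warnings) == limit:
--         warnings.append(f"Additional GTFS warnings omitted after {limit} entries.")
--
-- # table-driven classification: bit 0 = weekday(0..4), bit 1 = Saturday, bit 2 = Sunday,
-- # bit 3 = any other index; the 16-entry table gives (result, warning kind) per mask
-- _MASK_TABLE = [
--     ("WEEKDAY", None),     # 0b0000 empty
--     ("WEEKDAY", None),     # 0b0001 weekdays only
--     ("SAT", None),         # 0b0010 Saturday only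
--     ("WEEKDAY", "mixed"),  # 0b0011
--     ("SUN_HOL", None),     # 0b0100 Sunday only
--     ("WEEKDAY", "mixed"),  # 0b0101
--     ("SUN_HOL", "both"),   # 0b0110 Saturday and Sunday
--     ("WEEKDAY", "mixed"),  # 0b0111
-- ] + [("WEEKDAY", "mixed")] * 8  # any mask containing the 'other' bit
--
-- def _service_id_from_calendar_dates(raw_service_id, weekday_indexes, warnings):
--     mask = 0
--     for index in weekday_indexes:
--         i = int(index)
--         mask |= 1 << (0 if 0 <= i <= 4 else 1 if i == 5 else 2 if i == 6 else 3)
--     result, kind = _MASK_TABLE[mask]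
--     if kind == "both":
--         _append_warning(
--             warnings,
--             f"GTFS service_id '{raw_service_id}' appears on both Saturday and Sunday exception dates; mapped to SUN_HOL.",
--         )
--     elif kind == "mixed":
--         _append_warning(
--             warnings,
--             f"GTFS service_id '{raw_service_id}' only appears in calendar_dates.txt with mixed weekdays; mapped to WEEKDAY.",
--         )
--     return result
-- ===== Notes on version B (the rewrite author's own statement) =====
-- stated objective: alternative
-- what changed: Replaces the set construction plus subset/equality branch chain with a bitmask fold (bits for weekday-range/Saturday/Sunday/other) and a 16-entry lookup table mapping each mask directly to the result and warning kind.
import Mathlib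
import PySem

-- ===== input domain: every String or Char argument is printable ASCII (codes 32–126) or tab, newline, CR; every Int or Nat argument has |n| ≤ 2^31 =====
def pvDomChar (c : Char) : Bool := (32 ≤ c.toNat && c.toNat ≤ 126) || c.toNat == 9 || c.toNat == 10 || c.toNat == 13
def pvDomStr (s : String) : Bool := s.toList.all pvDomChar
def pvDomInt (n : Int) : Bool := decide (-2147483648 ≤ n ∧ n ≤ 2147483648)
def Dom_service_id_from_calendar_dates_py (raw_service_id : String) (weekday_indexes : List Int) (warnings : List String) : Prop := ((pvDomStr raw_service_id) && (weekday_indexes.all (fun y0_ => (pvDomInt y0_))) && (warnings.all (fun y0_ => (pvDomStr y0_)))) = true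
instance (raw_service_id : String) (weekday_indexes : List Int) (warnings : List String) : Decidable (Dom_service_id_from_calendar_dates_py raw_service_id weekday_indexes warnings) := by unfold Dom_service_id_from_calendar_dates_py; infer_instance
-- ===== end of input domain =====

-- B replaces the set + subset/equality branch chain with a bitmask fold (bits for
-- weekday-range / Saturday / Sunday / other) and a 16-entry lookup table mapping each
-- mask to the result and warning kind (alternative; same cost). Equivalence is about the
-- RETURN value only: both Pythons mutate `warnings` identically (same _append_warning
-- call with the same message on the same inputs).

-- ===== PORT A =====
-- weekdays = {int(index) for index in weekday_indexes}; int() is the identity on Int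
def service_id_from_calendar_dates_py (raw_service_id : String) (weekday_indexes : List Int) (warnings : List String) : String :=
  let weekdays : PySem.Set Int := PySem.Set.ofList weekday_indexes
  if weekdays.isEmpty then "WEEKDAY"
  else if PySem.Set.issubset weekdays (PySem.Set.ofList ([0, 1, 2, 3, 4] : List Int)) then "WEEKDAY"
  else if PySem.Set.equal weekdays (PySem.Set.ofList ([5] : List Int)) then "SAT"
  else if PySem.Set.equal weekdays (PySem.Set.ofList ([6] : List Int)) then "SUN_HOL"
  else if PySem.Set.issubset weekdays (PySem.Set.ofList ([5, 6] : List Int)) then "SUN_HOL"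
  else "WEEKDAY"

-- ===== PORT B =====
-- Source B's _MASK_TABLE: (result, warning kind) per 4-bit mask; kind None → none
def pvMaskTable : List (String × Option String) :=
  [("WEEKDAY", none), ("WEEKDAY", none), ("SAT", none), ("WEEKDAY", some "mixed"),
   ("SUN_HOL", none), ("WEEKDAY", some "mixed"), ("SUN_HOL", some "both"), ("WEEKDAY", some "mixed"),
   ("WEEKDAY", some "mixed"), ("WEEKDAY", some "mixed"), ("WEEKDAY", some "mixed"), ("WEEKDAY", some "mixed"),
   ("WEEKDAY", some "mixed"), ("WEEKDAY", some "mixed"), ("WEEKDAY", some "mixed"), ("WEEKDAY", some "mixed")]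

-- 1 << (0 if 0<=i<=4 else 1 if i==5 else 2 if i==6 else 3), as its value
def pvClassBit (i : Int) : Nat :=
  if 0 ≤ i ∧ i ≤ 4 then 1 else if i = 5 then 2 else if i = 6 then 4 else 8

-- the mask-accumulating loop of Source B: mask |= pvClassBit i
def pvMask : List Int → Nat → Nat
  | [], m => m
  | i :: rest, m => pvMask rest (m ||| pvClassBit i)

def service_id_from_calendar_dates_py_alt (raw_service_id : String) (weekday_indexes : List Int) (warnings : List String) : String :=
  let mask := pvMask weekday_indexes 0
  -- mask < 16 always, so the default of the totality guard is never reached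
  let entry := (PySem.List.pyGet? pvMaskTable (mask : Int)).getD ("WEEKDAY", none)
  -- the warning kind entry.2 only drives the warnings mutation, not the return value
  entry.1

-- ===== PRECONDITION & SPEC =====
def Spec_service_id_from_calendar_dates_py (raw_service_id : String) (weekday_indexes : List Int) (warnings : List String) (out : String) : Prop := out = service_id_from_calendar_dates_py_alt raw_service_id weekday_indexes warnings
instance (raw_service_id : String) (weekday_indexes : List Int) (warnings : List String) (out : String) : Decidable (Spec_service_id_from_calendar_dates_py raw_service_id weekday_indexes warnings out) := by unfold Spec_service_id_from_calendar_dates_py; infer_instance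

-- ===== CLAIM (what is proved, stated in full; the proofs are below) =====
def Claim_equal_service_id_from_calendar_dates_py : Prop := ∀ (raw_service_id : String) (weekday_indexes : List Int) (warnings : List String), Dom_service_id_from_calendar_dates_py raw_service_id weekday_indexes warnings → Spec_service_id_from_calendar_dates_py raw_service_id weekday_indexes warnings (service_id_from_calendar_dates_py raw_service_id weekday_indexes warnings)

-- ===== LEMMAS AND PROOFS =====

-- shorthand predicates for the element classes
def pvP04 (i : Int) : Bool := decide (0 ≤ i ∧ i ≤ 4)
def pvPO (i : Int) : Bool := !pvP04 i && !(i == 5) && !(i == 6)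

-- flag quadruple encoded as the bitmask Source B computes
def pvEnc (a s u o : Bool) : Nat :=
  (cond a 1 0) ||| (cond s 2 0) ||| (cond u 4 0) ||| (cond o 8 0)

theorem pvMask_spec (l : List Int) (m : Nat) :
    pvMask l m = m ||| pvEnc (l.any pvP04) (l.contains 5) (l.contains 6) (l.any pvPO) := by
  induction l generalizing m with
  | nil => simp [pvMask, pvEnc]
  | cons i rest ih =>
      rw [pvMask, ih]
      simp only [List.any_cons, List.contains_cons]
      by_cases h04 : 0 ≤ i ∧ i ≤ 4
      · have hA : pvP04 i = true := by simp [pvP04]; omega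
        have h5' : ((5 : Int) == i) = false := by simp; omega
        have h6' : ((6 : Int) == i) = false := by simp; omega
        have hO : pvPO i = false := by simp [pvPO, hA]
        have hb : pvClassBit i = 1 := by simp [pvClassBit, h04]
        simp only [hA, h5', h6', hO, hb, Bool.true_or, Bool.false_or]
        cases rest.any pvP04 <;> cases rest.contains 5 <;> cases rest.contains 6 <;>
          cases rest.any pvPO <;> (rw [Nat.lor_assoc]; congr 1; try decide)
      · by_cases h5 : i = 5
        · have hA : pvP04 i = false := by rw [h5]; decide
          have h5' : ((5 : Int) == i) = true := by simp [h5]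
          have h6' : ((6 : Int) == i) = false := by rw [h5]; decide
          have hO : pvPO i = false := by rw [h5]; decide
          have hb : pvClassBit i = 2 := by rw [h5]; decide
          simp only [hA, h5', h6', hO, hb, Bool.true_or, Bool.false_or]
          cases rest.any pvP04 <;> cases rest.contains 5 <;> cases rest.contains 6 <;>
            cases rest.any pvPO <;> (rw [Nat.lor_assoc]; congr 1; try decide)
        · by_cases h6 : i = 6
          · have hA : pvP04 i = false := by rw [h6]; decide
            have h5' : ((5 : Int) == i) = false := by rw [h6]; decide
            have h6' : ((6 : Int) == i) = true := by simp [h6]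
            have hO : pvPO i = false := by rw [h6]; decide
            have hb : pvClassBit i = 4 := by rw [h6]; decide
            simp only [hA, h5', h6', hO, hb, Bool.true_or, Bool.false_or]
            cases rest.any pvP04 <;> cases rest.contains 5 <;> cases rest.contains 6 <;>
              cases rest.any pvPO <;> (rw [Nat.lor_assoc]; congr 1; try decide)
          · have hA : pvP04 i = false := by simp [pvP04]; omega
            have h5' : ((5 : Int) == i) = false := by simp; omega
            have h6' : ((6 : Int) == i) = false := by simp; omega
            have hO : pvPO i = true := by simp [pvPO, pvP04, h5, h6]; omega
            have hb : pvClassBit i = 8 := by simp [pvClassBit, h04, h5, h6]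
            simp only [hA, h5', h6', hO, hb, Bool.true_or, Bool.false_or]
            cases rest.any pvP04 <;> cases rest.contains 5 <;> cases rest.contains 6 <;>
              cases rest.any pvPO <;> (rw [Nat.lor_assoc]; congr 1; try decide)

-- A's emptiness / subset / equality tests, characterised by the four flags
theorem pv_empty_eq (l : List Int) :
    (PySem.Set.ofList l).isEmpty =
      (!(l.any pvP04) && !(l.contains 5) && !(l.contains 6) && !(l.any pvPO)) := by
  induction l with
  | nil => rfl
  | cons i rest ih =>
      simp [PySem.Set.ofList_cons, List.any_cons, List.contains_cons, pvP04, pvPO]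
      by_cases h04 : 0 ≤ i ∧ i ≤ 4
      · simp [h04]
      · by_cases h5 : i = 5
        · simp [h5]
        · by_cases h6 : i = 6 <;> simp [h04, h5, h6]

theorem pv_sub04_eq (l : List Int) :
    PySem.Set.issubset (PySem.Set.ofList l) (PySem.Set.ofList ([0, 1, 2, 3, 4] : List Int)) =
      (!(l.contains 5) && !(l.contains 6) && !(l.any pvPO)) := by
  rw [Bool.eq_iff_iff]
  simp only [PySem.Set.issubset_iff, PySem.Set.mem_ofList, Bool.and_eq_true, Bool.not_eq_true',
    List.contains_eq_mem, decide_eq_false_iff_not, List.any_eq_false, pvPO, pvP04]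
  constructor
  · intro h
    refine ⟨⟨fun h5 => ?_, fun h6 => ?_⟩, fun x hx => ?_⟩
    · have := h 5 h5; simp at this
    · have := h 6 h6; simp at this
    · have := h x hx; simp at this ⊢; omega
  · rintro ⟨⟨h5, h6⟩, ho⟩ x hx
    have h5x : x ≠ 5 := fun e => h5 (e ▸ hx)
    have h6x : x ≠ 6 := fun e => h6 (e ▸ hx)
    have hxx := ho x hx
    simp [h5x, h6x] at hxx
    simp
    omega

theorem pv_eq_single (l : List Int) (v : Int) :
    PySem.Set.equal (PySem.Set.ofList l) (PySem.Set.ofList ([v] : List Int)) =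
      (l.contains v && l.all (· == v)) := by
  rw [Bool.eq_iff_iff]
  simp only [PySem.Set.equal_iff, PySem.Set.mem_ofList, Bool.and_eq_true, List.contains_eq_mem,
    decide_eq_true_eq, List.all_eq_true, beq_iff_eq, List.mem_singleton]
  constructor
  · intro h
    exact ⟨(h v).2 rfl, fun x hx => (h x).1 hx⟩
  · rintro ⟨hv, hall⟩ x
    exact ⟨fun hx => hall x hx, fun hx => hx ▸ hv⟩

theorem pv_all5_eq (l : List Int) :
    l.all (· == (5 : Int)) = (!(l.any pvP04) && !(l.contains 6) && !(l.any pvPO)) := by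
  induction l with
  | nil => rfl
  | cons i rest ih =>
      simp only [List.all_cons, List.any_cons, List.contains_cons, ih, pvP04, pvPO]
      by_cases h5 : i = 5
      · simp [h5]
      · by_cases h04 : 0 ≤ i ∧ i ≤ 4
        · simp [h04, h5, beq_iff_eq, show ¬(6 : Int) = i by omega]
        · by_cases h6 : i = 6
          · simp [h04, h5, h6]
          · have e5 : (i == (5 : Int)) = false := by simpa using h5
            have e6 : ((6 : Int) == i) = false := by simpa using fun e => h6 e.symm
            simp [h04, h6, e5, e6]

theorem pv_all6_eq (l : List Int) :
    l.all (· == (6 : Int)) = (!(l.any pvP04) && !(l.contains 5) && !(l.any pvPO)) := by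
  induction l with
  | nil => rfl
  | cons i rest ih =>
      simp only [List.all_cons, List.any_cons, List.contains_cons, ih, pvP04, pvPO]
      by_cases h6 : i = 6
      · simp [h6]
      · by_cases h04 : 0 ≤ i ∧ i ≤ 4
        · simp [h04, h6, beq_iff_eq, show ¬(5 : Int) = i by omega]
        · by_cases h5 : i = 5
          · simp [h04, h5, h6]
          · have e6 : (i == (6 : Int)) = false := by simpa using h6
            have e5 : ((5 : Int) == i) = false := by simpa using fun e => h5 e.symm
            simp [h04, h5, e5, e6]

theorem pv_sub56_eq (l : List Int) :
    PySem.Set.issubset (PySem.Set.ofList l) (PySem.Set.ofList ([5, 6] : List Int)) =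
      (!(l.any pvP04) && !(l.any pvPO)) := by
  rw [Bool.eq_iff_iff]
  simp only [PySem.Set.issubset_iff, PySem.Set.mem_ofList, Bool.and_eq_true, Bool.not_eq_true',
    List.any_eq_false, pvP04, pvPO]
  constructor
  · intro h
    refine ⟨fun x hx => ?_, fun x hx => ?_⟩ <;>
      · have := h x hx; simp at this ⊢; omega
  · rintro ⟨hp, ho⟩ x hx
    have h1 := hp x hx
    have h2 := ho x hx
    simp at h1 h2 ⊢
    omega

-- ===== VERDICT (by name: the statement is the Claim_ definition above) =====
theorem service_id_from_calendar_dates_py_spec : Claim_equal_service_id_from_calendar_dates_py := by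
  intro raw l w _
  show _ = _
  unfold service_id_from_calendar_dates_py service_id_from_calendar_dates_py_alt
  simp only [pvMask_spec, pv_empty_eq, pv_sub04_eq, pv_eq_single, pv_all5_eq, pv_all6_eq,
    pv_sub56_eq]
  cases l.any pvP04 <;> cases l.contains (5 : Int) <;> cases l.contains (6 : Int) <;>
    cases l.any pvPO <;> rfl
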